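-- pv_equiv track=rewrite | github.com/joeharrisuk/application-aware-benchmarking | Figure 3/fccb.py | expand_pauli
-- ===== SOURCE A (Python) =====
-- def expand_pauli(pauli, qubits, tot_qubits):
--
--     expanded_pauli = ''
--     for i in range(tot_qubits):
--         if i in qubits:
--             expanded_pauli += pauli[qubits.index(i)]
--         else:
--             expanded_pauli += 'I'
--
--     return expanded_pauli
-- ===== SOURCE B (Python) =====
-- def expand_pauli(pauli, qubits, tot_qubits):
--     # Scatter instead of gather: start from the all-identity register and write each
--     # Pauli letter at its qubit position; iterating the (qubit, letter) pairs in
--     # reverse makes the first occurrence of a duplicated qubit win, like qubits.index.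
--     out = ['I'] * tot_qubits
--     for q, p in reversed(list(zip(qubits, pauli))):
--         if 0 <= q < tot_qubits:
--             out[q] = p
--     return ''.join(out)
-- ===== Notes on version B (the rewrite author's own statement) =====
-- stated objective: faster
-- what changed: B scatters instead of gathers: it starts from an all-identity character list and writes each Pauli letter at its qubit position, iterating the zipped (qubit, letter) pairs in reverse so the first occurrence of a duplicated qubit wins; A's per-position 'in qubits'/'qubits.index' scans disappear.
import Mathlib
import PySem

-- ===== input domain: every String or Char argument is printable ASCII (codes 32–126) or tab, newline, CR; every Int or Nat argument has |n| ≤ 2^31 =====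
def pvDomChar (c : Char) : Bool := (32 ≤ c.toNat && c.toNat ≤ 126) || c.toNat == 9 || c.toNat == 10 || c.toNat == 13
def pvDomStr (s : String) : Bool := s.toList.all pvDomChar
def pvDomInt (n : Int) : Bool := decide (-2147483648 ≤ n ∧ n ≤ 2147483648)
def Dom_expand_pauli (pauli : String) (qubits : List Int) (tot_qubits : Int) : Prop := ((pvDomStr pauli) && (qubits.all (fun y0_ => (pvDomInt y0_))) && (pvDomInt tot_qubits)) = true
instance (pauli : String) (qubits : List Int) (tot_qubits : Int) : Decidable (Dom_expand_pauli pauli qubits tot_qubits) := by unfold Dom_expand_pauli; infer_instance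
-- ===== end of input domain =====

-- B scatters instead of gathers: it writes each Pauli letter into an all-identity register
-- (reversed pairs so the first occurrence of a duplicated qubit wins), which removes A's
-- per-position linear scans (asymptotically faster).

-- ===== PORT A =====
-- expanded_pauli = ''; for i in range(tot_qubits): if i in qubits: += pauli[qubits.index(i)] else: += 'I'
-- pauli[j] may raise IndexError (none); the fold carries Option, Pre_ excludes the none case.
def expand_pauli (pauli : String) (qubits : List Int) (tot_qubits : Int) : String :=
  let r : Option (List Char) :=
    (PySem.List.pyRange 0 tot_qubits 1).foldl
      (fun acc i =>
        acc.bind fun s =>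
          if qubits.contains i then
            match PySem.List.index? qubits i with
            | some j =>
              match PySem.List.pyGet? pauli.toList (j : Int) with
              | some c => some (s ++ [c])
              | none => none
            | none => none
          else some (s ++ ['I']))
      (some [])
  String.ofList (r.getD [])

-- ===== PORT B =====
-- out = ['I'] * tot_qubits   (negative tot_qubits gives the empty list, as in Python;
-- .toNat clamps negatives to 0, which is exact here)
-- for q, p in reversed(list(zip(qubits, pauli))): if 0 <= q < tot_qubits: out[q] = p
-- (the guard ensures 0 ≤ q, so q.toNat is exact; List.set at an in-range index is Python's out[q] = p)
-- return ''.join(out)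
def expand_pauli_alt (pauli : String) (qubits : List Int) (tot_qubits : Int) : String :=
  let out : List Char := List.replicate tot_qubits.toNat 'I'
  let out := ((qubits.zip pauli.toList).reverse).foldl
    (fun o qp => if 0 ≤ qp.1 ∧ qp.1 < tot_qubits then o.set qp.1.toNat qp.2 else o) out
  String.ofList out

-- ===== PRECONDITION & SPEC =====
-- Pre_ excludes exactly the inputs where Python A raises IndexError: some position i in
-- range(tot_qubits) occurs in qubits with qubits.index(i) >= len(pauli).
def Pre_expand_pauli (pauli : String) (qubits : List Int) (tot_qubits : Int) : Prop :=
  (qubits.all (fun q =>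
    !(decide (0 ≤ q ∧ q < tot_qubits)) ||
    (PySem.List.index? qubits q).all (fun j => decide (j < pauli.toList.length)))) = true
instance (pauli : String) (qubits : List Int) (tot_qubits : Int) : Decidable (Pre_expand_pauli pauli qubits tot_qubits) := by unfold Pre_expand_pauli; infer_instance
def pvWitness_expand_pauli : String × List Int × Int := ("XZ", [1, 0], 3)

def Spec_expand_pauli (pauli : String) (qubits : List Int) (tot_qubits : Int) (out : String) : Prop := out = expand_pauli_alt pauli qubits tot_qubits
instance (pauli : String) (qubits : List Int) (tot_qubits : Int) (out : String) : Decidable (Spec_expand_pauli pauli qubits tot_qubits out) := by unfold Spec_expand_pauli; infer_instance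

-- ===== CLAIM (what is proved, stated in full; the proofs are below) =====
def Claim_equal_expand_pauli : Prop := ∀ (pauli : String) (qubits : List Int) (tot_qubits : Int), Dom_expand_pauli pauli qubits tot_qubits → Pre_expand_pauli pauli qubits tot_qubits → Spec_expand_pauli pauli qubits tot_qubits (expand_pauli pauli qubits tot_qubits)

-- ===== LEMMAS AND PROOFS =====

-- The per-position value A computes (under Pre_): first occurrence's letter, else 'I'.
def pvF (pauli : String) (qubits : List Int) (i : Int) : Char :=
  match PySem.List.index? qubits i with
  | some j => pauli.toList.getD j 'I'
  | none => 'I'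

-- A's Option fold never fails under the per-element condition and produces the map of pvF.
theorem pvFoldA (pauli : String) (qubits : List Int) (l : List Int) (s : List Char)
    (h : ∀ i ∈ l, qubits.contains i = true →
      ∃ j, PySem.List.index? qubits i = some j ∧ j < pauli.toList.length) :
    l.foldl
      (fun acc i =>
        acc.bind fun s =>
          if qubits.contains i then
            match PySem.List.index? qubits i with
            | some j =>
              match PySem.List.pyGet? pauli.toList (j : Int) with
              | some c => some (s ++ [c])
              | none => none
            | none => none
          else some (s ++ ['I']))
      (some s) = some (s ++ l.map (pvF pauli qubits)) := by
  induction l generalizing s with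
  | nil => simp
  | cons i l ih =>
    simp only [List.foldl_cons, List.map_cons, Option.bind_some]
    by_cases hc : qubits.contains i = true
    · obtain ⟨j, hj, hjl⟩ := h i (by simp) hc
      have hinit : (match PySem.List.index? qubits i with
          | some j =>
            match PySem.List.pyGet? pauli.toList (j : Int) with
            | some c => some (s ++ [c])
            | none => none
          | none => none) = some (s ++ [pauli.toList[j]]) := by
        rw [hj]
        simp [PySem.List.pyGet?_natCast, List.getElem?_eq_getElem hjl]
      rw [if_pos hc, hinit]
      rw [ih _ (fun i hi => h i (by simp [hi]))]
      have hf : pvF pauli qubits i = pauli.toList[j] := by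
        unfold pvF; rw [hj]; simp [List.getD_eq_getElem?_getD, List.getElem?_eq_getElem hjl]
      simp [hf]
    · rw [if_neg hc, ih _ (fun i hi => h i (by simp [hi]))]
      have : pvF pauli qubits i = 'I' := by
        unfold pvF
        rw [(PySem.List.index?_eq_none_iff qubits i).mpr (by simpa using hc)]
      simp [this]

-- B's scatter loop over the reversed pairs = foldr over the pairs.
-- Its length is preserved …
theorem pvFoldB_length (tot_qubits : Int) (l : List (Int × Char)) (init : List Char) :
    (l.foldr (fun qp o => if 0 ≤ qp.1 ∧ qp.1 < tot_qubits then o.set qp.1.toNat qp.2 else o) init).length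
      = init.length := by
  induction l with
  | nil => rfl
  | cons qp l ih => simp only [List.foldr_cons]; split_ifs <;> simp [ih]
-- … and position n holds the FIRST pair with that qubit (foldr applies the head's write last).
theorem pvFoldB_getElem? (tot_qubits : Int) (l : List (Int × Char)) (init : List Char)
    (hlen : init.length = tot_qubits.toNat) (n : Nat) (hn : n < tot_qubits.toNat) :
    (l.foldr (fun qp o => if 0 ≤ qp.1 ∧ qp.1 < tot_qubits then o.set qp.1.toNat qp.2 else o) init)[n]?
      = match l.find? (fun qp => qp.1 == (n : Int)) with
        | some qp => some qp.2
        | none => init[n]? := by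
  induction l with
  | nil => rfl
  | cons qp l ih =>
    simp only [List.foldr_cons, List.find?_cons]
    by_cases hb : (qp.1 == (n : Int)) = true
    · have hq : qp.1 = (n : Int) := by simpa using hb
      rw [if_pos (show 0 ≤ qp.1 ∧ qp.1 < tot_qubits by constructor <;> omega)]
      simp only [hb]
      have hr : qp.1.toNat = n := by omega
      rw [hr, List.getElem?_set_eq_of_lt _ (by rw [pvFoldB_length, hlen]; exact hn)]
    · simp only [Bool.not_eq_true] at hb
      simp only [hb]
      by_cases hg : 0 ≤ qp.1 ∧ qp.1 < tot_qubits
      · rw [if_pos hg]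
        have hne : qp.1.toNat ≠ n := by
          intro h
          have : qp.1 = (n : Int) := by omega
          simp [this] at hb
        rw [List.getElem?_set_of_lt _ _ (by rw [pvFoldB_length, hlen]; exact hn), if_neg hne, ih]
      · rw [if_neg hg, ih]

-- find? over the zipped pairs = lookup at the first index, truncated at len(pauli).
theorem pvFindZip (qs : List Int) (ps : List Char) (i : Int) :
    (qs.zip ps).find? (fun qp => qp.1 == i)
      = (PySem.List.index? qs i).bind (fun j => ps[j]?.map (fun c => (i, c))) := by
  induction qs generalizing ps with
  | nil => simp [PySem.List.index?_eq_idxOf?]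
  | cons q qs ih =>
    cases ps with
    | nil =>
      simp only [List.zip_nil_right, List.find?_nil]
      cases hx : PySem.List.index? (q :: qs) i <;> simp
    | cons c ps =>
      simp only [List.zip_cons_cons, List.find?_cons]
      by_cases hq : (q == i) = true
      · have : q = i := by simpa using hq
        subst this
        rw [PySem.List.index?_cons_self]
        simp
      · have hne : q ≠ i := by simpa using hq
        rw [PySem.List.index?_cons_of_ne qs hne, ih ps]
        simp only [hq]
        cases hx : PySem.List.index? qs i <;> simp

-- ===== VERDICT (by name: the statement is the Claim_ definition above) =====
theorem expand_pauli_spec : Claim_equal_expand_pauli := by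
  intro pauli qubits tot_qubits _ hpre
  unfold Spec_expand_pauli expand_pauli expand_pauli_alt
  unfold Pre_expand_pauli at hpre
  rw [List.all_eq_true] at hpre
  -- A's fold succeeds and equals the map of pvF
  have hA := pvFoldA pauli qubits (PySem.List.pyRange 0 tot_qubits 1) []
    (by
      intro i hi hc
      have hmem : i ∈ qubits := by simpa using hc
      have hrange : 0 ≤ i ∧ i < tot_qubits := by
        have := (PySem.List.mem_pyRange_one).mp hi
        omega
      have := hpre i hmem
      rw [Bool.or_eq_true] at this
      rcases this with h | h
      · simp [hrange] at h
      · obtain ⟨j, hj⟩ := (PySem.List.index?_isSome_iff qubits i).mpr hmem |> Option.isSome_iff_exists.mp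
        refine ⟨j, hj, ?_⟩
        rw [Option.all_eq_true] at h
        have := h j hj
        simpa using this)
  simp only [hA, Option.getD_some, List.nil_append]
  -- now compare the two character lists
  congr 1
  rw [List.foldl_reverse]
  have hlen0 : (List.replicate tot_qubits.toNat 'I').length = tot_qubits.toNat := by simp
  apply List.ext_getElem?
  intro n
  by_cases hn : n < tot_qubits.toNat
  · rw [pvFoldB_getElem? tot_qubits _ _ hlen0 n hn]
    have hmapn : ((PySem.List.pyRange 0 tot_qubits 1).map (pvF pauli qubits))[n]?
        = some (pvF pauli qubits (n : Int)) := by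
      have hn' : n < (PySem.List.pyRange 0 tot_qubits 1).length := by
        rw [PySem.List.length_pyRange_one]; omega
      rw [List.getElem?_map, List.getElem?_eq_getElem hn', PySem.List.getElem_pyRange_one]
      simp
    rw [hmapn, pvFindZip qubits pauli.toList (n : Int)]
    unfold pvF
    cases hx : PySem.List.index? qubits (n : Int) with
    | none => simp [hn]
    | some j =>
      have hmem : (n : Int) ∈ qubits := (PySem.List.index?_isSome_iff qubits _).mp (by rw [hx]; rfl)
      have := hpre _ hmem
      rw [Bool.or_eq_true] at this
      rcases this with h | h
      · exfalso
        have : ¬ (0 ≤ (n : Int) ∧ (n : Int) < tot_qubits) := by simpa using h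
        omega
      · rw [hx] at h
        rw [Option.all_eq_true] at h
        have hjl : j < pauli.toList.length := by simpa using h j rfl
        simp [List.getD_eq_getElem?_getD, List.getElem?_eq_getElem hjl]
  · have h1 : ((PySem.List.pyRange 0 tot_qubits 1).map (pvF pauli qubits))[n]? = none := by
      rw [List.getElem?_eq_none]
      rw [List.length_map, PySem.List.length_pyRange_one]; omega
    have h2 : _ = none := List.getElem?_eq_none (l := (qubits.zip pauli.toList).foldr
        (fun qp o => if 0 ≤ qp.1 ∧ qp.1 < tot_qubits then o.set qp.1.toNat qp.2 else o)
        (List.replicate tot_qubits.toNat 'I')) (i := n)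
      (by rw [pvFoldB_length]; simpa using hn)
    rw [h1, h2]
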